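-- pv_equiv track=rewrite | github.com/DanieleSalvi2810/CESQ_Hackathon_Quantum_Error_Correction | hackathon_live_demo.py | generate_syndromes
-- ===== SOURCE A (Python) =====
-- def wrap_index(index: int, size: int) -> int:
--     return index % size
--
-- def zeros(rows: int, cols: int) -> list[list[int]]:
--     return [[0 for _ in range(cols)] for _ in range(rows)]
--
-- def toggle(matrix: list[list[int]], row: int, col: int) -> None:
--     n_rows = len(matrix)
--     n_cols = len(matrix[0])
--     r = wrap_index(row, n_rows)
--     c = wrap_index(col, n_cols)
--     matrix[r][c] ^= 1
--
-- def generate_syndromes(error_matrix: list[list[int]]) -> tuple[list[list[int]], list[list[int]]]: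
--     d = len(error_matrix[0])
--     n_qubit_rows = len(error_matrix)
--     n_qubit_cols = len(error_matrix[0])
--
--     syndrome_plaquette = zeros(d, d)
--     syndrome_cross = zeros(d, d)
--
--     for i in range(n_qubit_rows):
--         for j in range(n_qubit_cols):
--             value = error_matrix[i][j]
--             even_row = (i % 2 == 0)
--
--             if even_row:
--                 if value in (1, 3):
--                     toggle(syndrome_plaquette, i // 2, j)
--                     toggle(syndrome_plaquette, i // 2, j + 1)
--                 if value in (2, 3):
--                     toggle(syndrome_cross, i // 2 - 1, j)
--                     toggle(syndrome_cross, i // 2, j)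
--             else:
--                 if value in (1, 3):
--                     toggle(syndrome_plaquette, (i - 1) // 2, j)
--                     toggle(syndrome_plaquette, (i + 1) // 2, j)
--                 if value in (2, 3):
--                     toggle(syndrome_cross, (i - 1) // 2, j - 1)
--                     toggle(syndrome_cross, (i - 1) // 2, j)
--
--     return syndrome_plaquette, syndrome_cross
-- ===== SOURCE B (Python) =====
-- def generate_syndromes(error_matrix):
--     d = len(error_matrix[0])
--     if d == 0:
--         return [], []
--     # Reduce-then-stencil: fold the error matrix into four d x d parity grids
--     # (even/odd rows, X/Z components), then read each syndrome cell off with a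
--     # fixed 4-point modular stencil.
--     eX = [[0] * d for _ in range(d)]
--     oX = [[0] * d for _ in range(d)]
--     eZ = [[0] * d for _ in range(d)]
--     oZ = [[0] * d for _ in range(d)]
--     for i in range(len(error_matrix)):
--         row = error_matrix[i]
--         k = (i // 2) % d
--         tX, tZ = (eX, eZ) if i % 2 == 0 else (oX, oZ)
--         for j in range(d):
--             v = row[j]
--             if v in (1, 3):
--                 tX[k][j] = 1 - tX[k][j]
--             if v in (2, 3):
--                 tZ[k][j] = 1 - tZ[k][j]
--     plaquette = [[(eX[p][q] + eX[p][(q - 1) % d] + oX[p][q] + oX[(p - 1) % d][q]) % 2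
--                   for q in range(d)] for p in range(d)]
--     cross = [[(eZ[p][q] + eZ[(p + 1) % d][q] + oZ[p][q] + oZ[p][(q + 1) % d]) % 2
--               for q in range(d)] for p in range(d)]
--     return plaquette, cross
-- ===== Notes on version B (the rewrite author's own statement) =====
-- stated objective: alternative
-- what changed: B replaces A's scatter of wrap-around XOR toggles into the syndrome grids by a reduce-then-stencil pass: one sweep folds the error matrix into four d x d even/odd-row parity grids, and each syndrome cell is then read off with a fixed 4-point modular stencil.
-- outside the precondition, e.g. on generate_syndromes([]): A raises IndexError, B raises IndexError; on generate_syndromes([[1, 3], [2]]): A raises IndexError, B raises IndexError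
import Mathlib
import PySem

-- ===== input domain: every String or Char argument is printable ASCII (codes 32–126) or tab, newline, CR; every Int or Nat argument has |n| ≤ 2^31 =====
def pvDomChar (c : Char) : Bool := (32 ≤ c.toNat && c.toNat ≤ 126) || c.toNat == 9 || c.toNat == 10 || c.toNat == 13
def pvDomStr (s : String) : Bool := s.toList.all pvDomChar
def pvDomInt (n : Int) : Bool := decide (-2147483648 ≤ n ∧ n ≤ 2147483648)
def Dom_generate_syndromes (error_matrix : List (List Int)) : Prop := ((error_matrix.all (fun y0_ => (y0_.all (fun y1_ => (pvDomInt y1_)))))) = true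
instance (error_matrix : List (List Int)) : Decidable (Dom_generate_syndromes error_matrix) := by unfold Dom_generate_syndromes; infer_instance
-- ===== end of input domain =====

-- B replaces A's scatter of wrap-around toggles by a reduce-then-stencil pass over four
-- even/odd parity grids; same cost, different algorithm (objective: alternative).

-- ===== PORT A =====
def pvWrapIndex (index size : Int) : Int := PySem.Int.mod index size

def pvZeros (rows cols : Int) : List (List Int) :=
  (PySem.List.pyRange 0 rows 1).map (fun _ => (PySem.List.pyRange 0 cols 1).map (fun _ => (0 : Int)))

-- toggle: Python raises ZeroDivisionError on an empty matrix; inside A this helper is only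
-- reached on a nonempty d×d matrix, where r and c are exact nonnegative in-range indices.
def pvToggle (matrix : List (List Int)) (row col : Int) : List (List Int) :=
  let nRows : Int := PySem.List.len matrix
  let nCols : Int := PySem.List.len (matrix.headD [])
  let r := pvWrapIndex row nRows
  let c := pvWrapIndex col nCols
  matrix.modify r.toNat (fun rw => rw.modify c.toNat (fun v => PySem.Int.bxor v 1))

def generate_syndromes (error_matrix : List (List Int)) : List (List Int) × List (List Int) :=
  let d : Int := PySem.List.len (error_matrix.headD [])  -- len(error_matrix[0]); IndexError on [] is outside Pre_
  let nQubitRows : Int := PySem.List.len error_matrix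
  let nQubitCols : Int := d
  (PySem.List.pyRange 0 nQubitRows 1).foldl (fun st i =>
    (PySem.List.pyRange 0 nQubitCols 1).foldl (fun st j =>
      let value := PySem.List.pyGetD (PySem.List.pyGetD error_matrix i []) j 0
      let evenRow := PySem.Int.mod i 2 == 0
      if evenRow then
        let P := if value = 1 ∨ value = 3 then
            pvToggle (pvToggle st.1 (PySem.Int.floordiv i 2) j) (PySem.Int.floordiv i 2) (j + 1) else st.1
        let C := if value = 2 ∨ value = 3 then
            pvToggle (pvToggle st.2 (PySem.Int.floordiv i 2 - 1) j) (PySem.Int.floordiv i 2) j else st.2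
        (P, C)
      else
        let P := if value = 1 ∨ value = 3 then
            pvToggle (pvToggle st.1 (PySem.Int.floordiv (i - 1) 2) j) (PySem.Int.floordiv (i + 1) 2) j else st.1
        let C := if value = 2 ∨ value = 3 then
            pvToggle (pvToggle st.2 (PySem.Int.floordiv (i - 1) 2) (j - 1)) (PySem.Int.floordiv (i - 1) 2) j else st.2
        (P, C)) st)
    (pvZeros d d, pvZeros d d)

-- ===== PORT B =====
abbrev pvGrids := (List (List Int) × List (List Int)) × (List (List Int) × List (List Int))

-- m[p][q] for in-range Nat indices
def pvG (m : List (List Int)) (p q : Nat) : Int := (m.getD p []).getD q 0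

-- m[p][q] = 1 - m[p][q]
def pvFlip (m : List (List Int)) (p q : Nat) : List (List Int) :=
  m.modify p (fun r => r.modify q (fun v => 1 - v))

def pvZeroGrid (d : Nat) : List (List Int) :=
  (List.range d).map (fun _ => (List.range d).map (fun _ => (0 : Int)))

def pvAccumCell (even : Bool) (k : Nat) (row : List Int) (st : pvGrids) (j : Nat) : pvGrids :=
  let v := row.getD j 0
  let st := if v = 1 ∨ v = 3 then
      (if even then ((pvFlip st.1.1 k j, st.1.2), st.2) else ((st.1.1, pvFlip st.1.2 k j), st.2))
    else st
  if v = 2 ∨ v = 3 then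
      (if even then (st.1, (pvFlip st.2.1 k j, st.2.2)) else (st.1, (st.2.1, pvFlip st.2.2 k j)))
    else st

def pvAccumRow (even : Bool) (k d : Nat) (row : List Int) (st : pvGrids) : pvGrids :=
  (List.range d).foldl (pvAccumCell even k row) st

def pvStencilP (d : Nat) (eX oX : List (List Int)) : List (List Int) :=
  (List.range d).map (fun p => (List.range d).map (fun q =>
    PySem.Int.mod (pvG eX p q + pvG eX p ((PySem.Int.mod ((q : Int) - 1) (d : Int)).toNat)
      + pvG oX p q + pvG oX ((PySem.Int.mod ((p : Int) - 1) (d : Int)).toNat) q) 2))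

def pvStencilC (d : Nat) (eZ oZ : List (List Int)) : List (List Int) :=
  (List.range d).map (fun p => (List.range d).map (fun q =>
    PySem.Int.mod (pvG eZ p q + pvG eZ ((p + 1) % d) q + pvG oZ p q + pvG oZ p ((q + 1) % d)) 2))

def generate_syndromes_alt (error_matrix : List (List Int)) : List (List Int) × List (List Int) :=
  let d := (error_matrix.headD []).length
  if d = 0 then ([], []) else
    let st0 : pvGrids := ((pvZeroGrid d, pvZeroGrid d), (pvZeroGrid d, pvZeroGrid d))
    let st := (List.range error_matrix.length).foldl (fun st i =>
      pvAccumRow (i % 2 == 0) (i / 2 % d) d (error_matrix.getD i []) st) st0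
    (pvStencilP d st.1.1 st.1.2, pvStencilC d st.2.1 st.2.2)

-- ===== PRECONDITION & SPEC =====
-- Pre_ excludes exactly the inputs on which Python A raises: the empty matrix
-- (error_matrix[0] is an IndexError) and matrices with a row shorter than the first row
-- (error_matrix[i][j] is an IndexError).  A returns on every other input.
def Pre_generate_syndromes (error_matrix : List (List Int)) : Prop :=
  error_matrix ≠ [] ∧ ∀ r ∈ error_matrix, (error_matrix.headD []).length ≤ r.length
instance (error_matrix : List (List Int)) : Decidable (Pre_generate_syndromes error_matrix) := by
  unfold Pre_generate_syndromes; infer_instance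

def pvWitness_generate_syndromes : List (List Int) := [[1, 2], [3, 0]]

def Spec_generate_syndromes (error_matrix : List (List Int)) (out : List (List Int) × List (List Int)) : Prop := out = generate_syndromes_alt error_matrix
instance (error_matrix : List (List Int)) (out : List (List Int) × List (List Int)) : Decidable (Spec_generate_syndromes error_matrix out) := by unfold Spec_generate_syndromes; infer_instance

-- ===== CLAIM (what is proved, stated in full; the proofs are below) =====
def Claim_equal_generate_syndromes : Prop := ∀ (error_matrix : List (List Int)), Dom_generate_syndromes error_matrix → Pre_generate_syndromes error_matrix → Spec_generate_syndromes error_matrix (generate_syndromes error_matrix)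

-- ===== LEMMAS AND PROOFS =====

-- a d×d matrix
def pvShape (d : Nat) (m : List (List Int)) : Prop :=
  m.length = d ∧ ∀ p < d, (m.getD p []).length = d

theorem pvEmodSuccCases (d : Int) (hd : 0 < d) (x : Int) :
    ((x + 1) % d = x % d + 1 ∧ x % d + 1 < d) ∨ ((x + 1) % d = 0 ∧ x % d + 1 = d) := by
  have he := Int.ediv_add_emod x d
  have hx : x + 1 = x % d + 1 + d * (x / d) := by linarith
  have h1 : (x + 1) % d = (x % d + 1) % d := by
    rw [hx, Int.add_mul_emod_self_left]
  have h0 : 0 ≤ x % d := Int.emod_nonneg x (by omega)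
  have h2 : x % d < d := Int.emod_lt_of_pos x hd
  rcases lt_or_eq_of_le (by omega : x % d + 1 ≤ d) with h | h
  · exact Or.inl ⟨by rw [h1, Int.emod_eq_of_lt (by omega) h], h⟩
  · exact Or.inr ⟨by rw [h1, h, Int.emod_self], h⟩


theorem pvNatSuccMod (d p : Nat) (hp : p < d) :
    ((p + 1) % d = p + 1 ∧ p + 1 < d) ∨ ((p + 1) % d = 0 ∧ p + 1 = d) := by
  rcases lt_or_eq_of_le (by omega : p + 1 ≤ d) with h | h
  · exact Or.inl ⟨Nat.mod_eq_of_lt h, h⟩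
  · exact Or.inr ⟨by rw [h, Nat.mod_self], h⟩



theorem pvExt {d : Nat} {m n : List (List Int)} (hm : pvShape d m) (hn : pvShape d n)
    (h : ∀ p < d, ∀ q < d, pvG m p q = pvG n p q) : m = n := by
  apply List.ext_getElem (by rw [hm.1, hn.1])
  intro p hp hp'
  have hpd : p < d := hm.1 ▸ hp
  have hmg : m.getD p [] = m[p] := List.getD_eq_getElem m [] hp
  have hng : n.getD p [] = n[p] := List.getD_eq_getElem n [] hp'
  have hml : m[p].length = d := by rw [← hmg]; exact hm.2 p hpd
  have hnl : n[p].length = d := by rw [← hng]; exact hn.2 p hpd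
  apply List.ext_getElem (by rw [hml, hnl])
  intro q hq hq'
  have hqd : q < d := hml ▸ hq
  have := h p hpd q hqd
  unfold pvG at this
  rw [hmg, hng] at this
  rwa [List.getD_eq_getElem _ 0 hq, List.getD_eq_getElem _ 0 hq'] at this

theorem pvG_modify {d : Nat} {m : List (List Int)} (hS : pvShape d m) (f : Int → Int)
    {a b : Nat} (ha : a < d) (hb : b < d) {p q : Nat} (hp : p < d) (hq : q < d) :
    pvG (m.modify a (fun r => r.modify b f)) p q
      = if p = a ∧ q = b then f (pvG m p q) else pvG m p q := by
  unfold pvG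
  have hpm : p < m.length := hS.1 ▸ hp
  have hmg : m.getD p [] = m[p] := List.getD_eq_getElem m [] hpm
  have hql : q < m[p].length := by
    have := hS.2 p hp; rw [hmg] at this; omega
  have hrow : (m.modify a (fun r => r.modify b f)).getD p []
      = if a = p then (m[p].modify b f) else m[p] := by
    rw [List.getD_eq_getElem?_getD, List.getElem?_modify, List.getElem?_eq_getElem hpm]
    by_cases h : a = p <;> simp [h]
  rw [hrow, hmg]
  have hcell : (m[p].modify b f).getD q 0 = if b = q then f (m[p].getD q 0) else m[p].getD q 0 := by
    rw [List.getD_eq_getElem?_getD, List.getElem?_modify, List.getElem?_eq_getElem hql]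
    by_cases h2 : b = q <;> simp [h2, List.getD_eq_getElem?_getD, List.getElem?_eq_getElem hql]
  by_cases h : a = p
  · rw [if_pos h, hcell]
    by_cases h2 : b = q
    · rw [if_pos h2, if_pos ⟨h.symm, h2.symm⟩]
    · rw [if_neg h2, if_neg (by tauto)]
  · rw [if_neg h, if_neg (by tauto)]

theorem pvShape_modify {d : Nat} {m : List (List Int)} (hS : pvShape d m) (f : Int → Int)
    (a b : Nat) : pvShape d (m.modify a (fun r => r.modify b f)) := by
  refine ⟨by rw [List.length_modify]; exact hS.1, ?_⟩
  intro p hp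
  have hpm : p < m.length := hS.1 ▸ hp
  have hmg : m.getD p [] = m[p] := List.getD_eq_getElem m [] hpm
  have hml : m[p].length = d := by rw [← hmg]; exact hS.2 p hp
  rw [List.getD_eq_getElem?_getD, List.getElem?_modify, List.getElem?_eq_getElem hpm]
  by_cases h : a = p <;> simp [h, List.length_modify, hml]


theorem pvModIdx_lt {d : Nat} (hd : 0 < d) (x : Int) :
    (PySem.Int.mod x (d : Int)).toNat < d ∧ ((PySem.Int.mod x (d : Int)).toNat : Int) = x % (d : Int) := by
  have hdz : (0:Int) < (d:Int) := by exact_mod_cast hd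
  have h0 := PySem.Int.mod_nonneg (a := x) (b := (d:Int)) (by omega)
  have h1 := PySem.Int.mod_lt (a := x) (b := (d:Int)) hdz
  have he := PySem.Int.mod_eq_emod_of_pos (a := x) hdz
  constructor
  · omega
  · rw [Int.toNat_of_nonneg h0, he]

theorem pvToggle_eq {d : Nat} (hd : 0 < d) {m : List (List Int)} (hS : pvShape d m)
    (r c : Int) :
    pvToggle m r c
      = m.modify (PySem.Int.mod r (d : Int)).toNat
          (fun rw => rw.modify (PySem.Int.mod c (d : Int)).toNat (fun v => PySem.Int.bxor v 1)) := by
  have h0 : m.headD [] = m.getD 0 [] := by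
    cases m with
    | nil => have := hS.1; simp at this; omega
    | cons x xs => rfl
  unfold pvToggle pvWrapIndex
  rw [PySem.List.len_eq, PySem.List.len_eq, hS.1, h0, hS.2 0 hd]


theorem pvShape_stencilP (d : Nat) (eX oX : List (List Int)) : pvShape d (pvStencilP d eX oX) := by
  refine ⟨by simp [pvStencilP], ?_⟩
  intro p hp
  unfold pvStencilP
  rw [PySem.List.getD_map_range _ _ _ _ hp]
  simp

theorem pvG_stencilP {d : Nat} (eX oX : List (List Int)) {p q : Nat} (hp : p < d) (hq : q < d) :
    pvG (pvStencilP d eX oX) p q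
      = (pvG eX p q + pvG eX p ((PySem.Int.mod ((q : Int) - 1) (d : Int)).toNat)
          + pvG oX p q + pvG oX ((PySem.Int.mod ((p : Int) - 1) (d : Int)).toNat) q) % 2 := by
  unfold pvG pvStencilP
  rw [PySem.List.getD_map_range _ _ _ _ hp, PySem.List.getD_map_range _ _ _ _ hq,
    PySem.Int.mod_eq_emod_of_pos (by norm_num)]
  rfl

theorem pvMod2_cases (x : Int) : x % 2 = 0 ∨ x % 2 = 1 := by omega
theorem pvBxorMod2 (x : Int) : PySem.Int.bxor (x % 2) 1 = 1 - x % 2 := by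
  rcases pvMod2_cases x with h | h <;> rw [h] <;> decide
theorem pvBxorOneSub (x : Int) :
    PySem.Int.bxor (1 - x % 2) 1 = x % 2 := by
  rcases pvMod2_cases x with h | h <;> rw [h] <;> decide


theorem pvL1 {d : Nat} (hd : 0 < d) {eX oX : List (List Int)}
    (hX : pvShape d eX) (hO : pvShape d oX) (a b : Int) :
    pvToggle (pvToggle (pvStencilP d eX oX) a b) a (b + 1)
      = pvStencilP d (pvFlip eX (PySem.Int.mod a (d : Int)).toNat (PySem.Int.mod b (d : Int)).toNat) oX := by
  have hdz : (0:Int) < (d:Int) := by exact_mod_cast hd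
  have hSP := pvShape_stencilP d eX oX
  rw [pvToggle_eq hd hSP a b]
  have hS1 := pvShape_modify hSP (fun v => PySem.Int.bxor v 1) (PySem.Int.mod a (d : Int)).toNat (PySem.Int.mod b (d : Int)).toNat
  rw [pvToggle_eq hd hS1 a (b + 1)]
  obtain ⟨hKlt, hKc⟩ := pvModIdx_lt hd a
  obtain ⟨hBlt, hBc⟩ := pvModIdx_lt hd b
  obtain ⟨hB1lt, hB1c⟩ := pvModIdx_lt hd (b + 1)
  apply pvExt (d := d)
  · exact pvShape_modify hS1 _ _ _
  · exact pvShape_stencilP d _ oX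
  intro p hp q hq
  obtain ⟨hQlt, hQc⟩ := pvModIdx_lt hd ((q : Int) - 1)
  obtain ⟨hPlt, hPc⟩ := pvModIdx_lt hd ((p : Int) - 1)
  rw [pvG_modify hS1 _ hKlt hB1lt hp hq, pvG_modify hSP _ hKlt hBlt hp hq,
    pvG_stencilP eX oX hp hq]
  show _ = pvG (pvStencilP d (eX.modify _ _) oX) p q
  rw [pvG_stencilP _ oX hp hq,
    pvG_modify hX _ hKlt hBlt hp hq, pvG_modify hX _ hKlt hBlt hp hQlt]
  rw [apply_ite (fun z => PySem.Int.bxor z 1), pvBxorMod2, pvBxorOneSub]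
  -- link facts
  have hsb := pvEmodSuccCases _ hdz b
  rw [← hBc, ← hB1c] at hsb
  have hsq := pvEmodSuccCases _ hdz ((q : Int) - 1)
  rw [sub_add_cancel, ← hQc, Int.emod_eq_of_lt (by omega) (by exact_mod_cast hq)] at hsq
  split_ifs <;> omega


theorem pvShape_stencilC (d : Nat) (eZ oZ : List (List Int)) : pvShape d (pvStencilC d eZ oZ) := by
  refine ⟨by simp [pvStencilC], ?_⟩
  intro p hp
  unfold pvStencilC
  rw [PySem.List.getD_map_range _ _ _ _ hp]
  simp

theorem pvG_stencilC {d : Nat} (eZ oZ : List (List Int)) {p q : Nat} (hp : p < d) (hq : q < d) :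
    pvG (pvStencilC d eZ oZ) p q
      = (pvG eZ p q + pvG eZ ((p + 1) % d) q + pvG oZ p q + pvG oZ p ((q + 1) % d)) % 2 := by
  unfold pvG pvStencilC
  rw [PySem.List.getD_map_range _ _ _ _ hp, PySem.List.getD_map_range _ _ _ _ hq,
    PySem.Int.mod_eq_emod_of_pos (by norm_num)]
  rfl

theorem pvL2 {d : Nat} (hd : 0 < d) {eX oX : List (List Int)}
    (hX : pvShape d eX) (hO : pvShape d oX) (a b : Int) :
    pvToggle (pvToggle (pvStencilP d eX oX) a b) (a + 1) b
      = pvStencilP d eX (pvFlip oX (PySem.Int.mod a (d : Int)).toNat (PySem.Int.mod b (d : Int)).toNat) := by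
  have hdz : (0:Int) < (d:Int) := by exact_mod_cast hd
  have hSP := pvShape_stencilP d eX oX
  rw [pvToggle_eq hd hSP a b]
  have hS1 := pvShape_modify hSP (fun v => PySem.Int.bxor v 1) (PySem.Int.mod a (d : Int)).toNat (PySem.Int.mod b (d : Int)).toNat
  rw [pvToggle_eq hd hS1 (a + 1) b]
  obtain ⟨hKlt, hKc⟩ := pvModIdx_lt hd a
  obtain ⟨hK1lt, hK1c⟩ := pvModIdx_lt hd (a + 1)
  obtain ⟨hBlt, hBc⟩ := pvModIdx_lt hd b
  apply pvExt (d := d)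
  · exact pvShape_modify hS1 _ _ _
  · exact pvShape_stencilP d eX _
  intro p hp q hq
  obtain ⟨hQlt, hQc⟩ := pvModIdx_lt hd ((q : Int) - 1)
  obtain ⟨hPlt, hPc⟩ := pvModIdx_lt hd ((p : Int) - 1)
  rw [pvG_modify hS1 _ hK1lt hBlt hp hq, pvG_modify hSP _ hKlt hBlt hp hq,
    pvG_stencilP eX oX hp hq]
  show _ = pvG (pvStencilP d eX (oX.modify _ _)) p q
  rw [pvG_stencilP eX _ hp hq,
    pvG_modify hO _ hKlt hBlt hp hq, pvG_modify hO _ hKlt hBlt hPlt hq]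
  rw [apply_ite (fun z => PySem.Int.bxor z 1), pvBxorMod2, pvBxorOneSub]
  have hsa := pvEmodSuccCases _ hdz a
  rw [← hKc, ← hK1c] at hsa
  have hsp := pvEmodSuccCases _ hdz ((p : Int) - 1)
  rw [sub_add_cancel, ← hPc, Int.emod_eq_of_lt (by omega) (by exact_mod_cast hp)] at hsp
  split_ifs <;> omega

theorem pvL3 {d : Nat} (hd : 0 < d) {eZ oZ : List (List Int)}
    (hZ : pvShape d eZ) (hO : pvShape d oZ) (a b : Int) :
    pvToggle (pvToggle (pvStencilC d eZ oZ) (a - 1) b) a b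
      = pvStencilC d (pvFlip eZ (PySem.Int.mod a (d : Int)).toNat (PySem.Int.mod b (d : Int)).toNat) oZ := by
  have hdz : (0:Int) < (d:Int) := by exact_mod_cast hd
  have hSP := pvShape_stencilC d eZ oZ
  rw [pvToggle_eq hd hSP (a - 1) b]
  have hS1 := pvShape_modify hSP (fun v => PySem.Int.bxor v 1) (PySem.Int.mod (a - 1) (d : Int)).toNat (PySem.Int.mod b (d : Int)).toNat
  rw [pvToggle_eq hd hS1 a b]
  obtain ⟨hKlt, hKc⟩ := pvModIdx_lt hd a
  obtain ⟨hKmlt, hKmc⟩ := pvModIdx_lt hd (a - 1)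
  obtain ⟨hBlt, hBc⟩ := pvModIdx_lt hd b
  apply pvExt (d := d)
  · exact pvShape_modify hS1 _ _ _
  · exact pvShape_stencilC d _ oZ
  intro p hp q hq
  rw [pvG_modify hS1 _ hKlt hBlt hp hq, pvG_modify hSP _ hKmlt hBlt hp hq,
    pvG_stencilC eZ oZ hp hq]
  show _ = pvG (pvStencilC d (eZ.modify _ _) oZ) p q
  have hp1 : (p + 1) % d < d := Nat.mod_lt _ hd
  rw [pvG_stencilC _ oZ hp hq,
    pvG_modify hZ _ hKlt hBlt hp hq, pvG_modify hZ _ hKlt hBlt hp1 hq]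
  rw [apply_ite (fun z => PySem.Int.bxor z 1), pvBxorMod2, pvBxorOneSub]
  have hsa := pvEmodSuccCases _ hdz (a - 1)
  rw [sub_add_cancel, ← hKc, ← hKmc] at hsa
  have hsp := pvNatSuccMod d p hp
  generalize hgen : (p + 1) % d = p1 at *
  split_ifs <;> omega

theorem pvL4 {d : Nat} (hd : 0 < d) {eZ oZ : List (List Int)}
    (hZ : pvShape d eZ) (hO : pvShape d oZ) (a b : Int) :
    pvToggle (pvToggle (pvStencilC d eZ oZ) a (b - 1)) a b
      = pvStencilC d eZ (pvFlip oZ (PySem.Int.mod a (d : Int)).toNat (PySem.Int.mod b (d : Int)).toNat) := by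
  have hdz : (0:Int) < (d:Int) := by exact_mod_cast hd
  have hSP := pvShape_stencilC d eZ oZ
  rw [pvToggle_eq hd hSP a (b - 1)]
  have hS1 := pvShape_modify hSP (fun v => PySem.Int.bxor v 1) (PySem.Int.mod a (d : Int)).toNat (PySem.Int.mod (b - 1) (d : Int)).toNat
  rw [pvToggle_eq hd hS1 a b]
  obtain ⟨hKlt, hKc⟩ := pvModIdx_lt hd a
  obtain ⟨hBlt, hBc⟩ := pvModIdx_lt hd b
  obtain ⟨hBmlt, hBmc⟩ := pvModIdx_lt hd (b - 1)
  apply pvExt (d := d)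
  · exact pvShape_modify hS1 _ _ _
  · exact pvShape_stencilC d eZ _
  intro p hp q hq
  rw [pvG_modify hS1 _ hKlt hBlt hp hq, pvG_modify hSP _ hKlt hBmlt hp hq,
    pvG_stencilC eZ oZ hp hq]
  show _ = pvG (pvStencilC d eZ (oZ.modify _ _)) p q
  have hq1 : (q + 1) % d < d := Nat.mod_lt _ hd
  rw [pvG_stencilC eZ _ hp hq,
    pvG_modify hO _ hKlt hBlt hp hq, pvG_modify hO _ hKlt hBlt hp hq1]
  rw [apply_ite (fun z => PySem.Int.bxor z 1), pvBxorMod2, pvBxorOneSub]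
  have hsb := pvEmodSuccCases _ hdz (b - 1)
  rw [sub_add_cancel, ← hBc, ← hBmc] at hsb
  have hsq := pvNatSuccMod d q hq
  generalize hgen : (q + 1) % d = q1 at *
  split_ifs <;> omega

def pvShape4 (d : Nat) (st : pvGrids) : Prop :=
  pvShape d st.1.1 ∧ pvShape d st.1.2 ∧ pvShape d st.2.1 ∧ pvShape d st.2.2

def pvABodyE (a : Int) (row : List Int) (st : List (List Int) × List (List Int)) (j : Nat) :
    List (List Int) × List (List Int) :=
  let v := row.getD j 0
  let P := if v = 1 ∨ v = 3 then pvToggle (pvToggle st.1 a (j : Int)) a ((j : Int) + 1) else st.1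
  let C := if v = 2 ∨ v = 3 then pvToggle (pvToggle st.2 (a - 1) (j : Int)) a (j : Int) else st.2
  (P, C)

def pvABodyO (a : Int) (row : List Int) (st : List (List Int) × List (List Int)) (j : Nat) :
    List (List Int) × List (List Int) :=
  let v := row.getD j 0
  let P := if v = 1 ∨ v = 3 then pvToggle (pvToggle st.1 a (j : Int)) (a + 1) (j : Int) else st.1
  let C := if v = 2 ∨ v = 3 then pvToggle (pvToggle st.2 a ((j : Int) - 1)) a (j : Int) else st.2
  (P, C)

def pvSPC (d : Nat) (st : pvGrids) : List (List Int) × List (List Int) :=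
  (pvStencilP d st.1.1 st.1.2, pvStencilC d st.2.1 st.2.2)

theorem pvShape_flip {d : Nat} {m : List (List Int)} (hS : pvShape d m) (a b : Nat) :
    pvShape d (pvFlip m a b) :=
  pvShape_modify hS _ a b

theorem pvFoldSim {α S T : Type} (R : S → T → Prop) :
    ∀ (l : List α) (f : S → α → S) (g : T → α → T),
      (∀ s t x, x ∈ l → R s t → R (f s x) (g t x)) →
      ∀ s t, R s t → R (l.foldl f s) (l.foldl g t) := by
  intro l
  induction l with
  | nil => intro f g _ s t h; simpa using h
  | cons x xs ih =>
    intro f g hstep s t h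
    simp only [List.foldl_cons]
    exact ih f g (fun s t y hy => hstep s t y (List.mem_cons_of_mem x hy))
      _ _ (hstep s t x List.mem_cons_self h)

theorem pvFoldlConst {α β : Type} (l : List α) (s : β) : l.foldl (fun s _ => s) s = s := by
  induction l with
  | nil => rfl
  | cons x xs ih => simpa using ih

theorem pvIdxNat {d : Nat} (hd : 0 < d) (k : Nat) (hk : k < d) :
    (PySem.Int.mod (k : Int) (d : Int)).toNat = k := by
  rw [PySem.Int.mod_natCast, Nat.mod_eq_of_lt hk, Int.toNat_natCast]

theorem pvCellE {d : Nat} (hd : 0 < d) (a : Int) (k : Nat)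
    (hk : ((k : Int)) = PySem.Int.mod a (d : Int)) (row : List Int) {st : pvGrids}
    (hS : pvShape4 d st) {j : Nat} (hj : j < d) :
    pvABodyE a row (pvSPC d st) j = pvSPC d (pvAccumCell true k row st j)
      ∧ pvShape4 d (pvAccumCell true k row st j) := by
  obtain ⟨⟨eX, oX⟩, eZ, oZ⟩ := st
  obtain ⟨hX, hO, hZ, hW⟩ := hS
  have hKk : (PySem.Int.mod a (d : Int)).toNat = k := by
    have h0 := PySem.Int.mod_nonneg (a := a) (b := (d : Int)) (by exact_mod_cast hd)
    omega
  have hJj : (PySem.Int.mod ((j : Int)) (d : Int)).toNat = j := pvIdxNat hd j hj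
  simp only [pvABodyE, pvAccumCell, pvSPC, pvShape4]
  by_cases h1 : row.getD j 0 = 1 ∨ row.getD j 0 = 3 <;>
    by_cases h2 : row.getD j 0 = 2 ∨ row.getD j 0 = 3 <;>
      simp only [h1, h2, if_true, if_false, ite_true, ite_false, Prod.mk.injEq]
  · exact ⟨⟨by rw [pvL1 hd hX hO a (j : Int), hKk, hJj],
      by rw [pvL3 hd hZ hW a (j : Int), hKk, hJj]⟩,
      pvShape_flip hX k j, hO, pvShape_flip hZ k j, hW⟩
  · exact ⟨⟨by rw [pvL1 hd hX hO a (j : Int), hKk, hJj], trivial⟩,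
      pvShape_flip hX k j, hO, hZ, hW⟩
  · exact ⟨⟨trivial, by rw [pvL3 hd hZ hW a (j : Int), hKk, hJj]⟩,
      hX, hO, pvShape_flip hZ k j, hW⟩
  · exact ⟨trivial, hX, hO, hZ, hW⟩

theorem pvCellO {d : Nat} (hd : 0 < d) (a : Int) (k : Nat)
    (hk : ((k : Int)) = PySem.Int.mod a (d : Int)) (row : List Int) {st : pvGrids}
    (hS : pvShape4 d st) {j : Nat} (hj : j < d) :
    pvABodyO a row (pvSPC d st) j = pvSPC d (pvAccumCell false k row st j)
      ∧ pvShape4 d (pvAccumCell false k row st j) := by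
  obtain ⟨⟨eX, oX⟩, eZ, oZ⟩ := st
  obtain ⟨hX, hO, hZ, hW⟩ := hS
  have hKk : (PySem.Int.mod a (d : Int)).toNat = k := by
    have h0 := PySem.Int.mod_nonneg (a := a) (b := (d : Int)) (by exact_mod_cast hd)
    omega
  have hJj : (PySem.Int.mod ((j : Int)) (d : Int)).toNat = j := pvIdxNat hd j hj
  simp only [pvABodyO, pvAccumCell, pvSPC, pvShape4, Bool.false_eq_true, if_false, ite_false]
  by_cases h1 : row.getD j 0 = 1 ∨ row.getD j 0 = 3 <;>
    by_cases h2 : row.getD j 0 = 2 ∨ row.getD j 0 = 3 <;>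
      simp only [h1, h2, if_true, if_false, ite_true, ite_false, Prod.mk.injEq]
  · exact ⟨⟨by rw [pvL2 hd hX hO a (j : Int), hKk, hJj],
      by rw [pvL4 hd hZ hW a (j : Int), hKk, hJj]⟩,
      hX, pvShape_flip hO k j, hZ, pvShape_flip hW k j⟩
  · exact ⟨⟨by rw [pvL2 hd hX hO a (j : Int), hKk, hJj], trivial⟩,
      hX, pvShape_flip hO k j, hZ, hW⟩
  · exact ⟨⟨trivial, by rw [pvL4 hd hZ hW a (j : Int), hKk, hJj]⟩,
      hX, hO, hZ, pvShape_flip hW k j⟩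
  · exact ⟨trivial, hX, hO, hZ, hW⟩

theorem pvRow {d : Nat} (hd : 0 < d) (even : Bool) (a : Int) (k : Nat)
    (hk : ((k : Int)) = PySem.Int.mod a (d : Int)) (row : List Int) {st : pvGrids}
    (hS : pvShape4 d st) :
    (List.range d).foldl ((if even then pvABodyE else pvABodyO) a row) (pvSPC d st)
      = pvSPC d (pvAccumRow even k d row st) ∧ pvShape4 d (pvAccumRow even k d row st) := by
  have h := pvFoldSim (α := Nat)
      (R := fun s t => pvShape4 d t ∧ s = pvSPC d t)
      (List.range d) ((if even then pvABodyE else pvABodyO) a row) (pvAccumCell even k row)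
      (by
        intro s t j hj ⟨ht, hs⟩
        subst hs
        have hjd : j < d := List.mem_range.mp hj
        cases even
        · simp only [if_false, ite_false, Bool.false_eq_true]
          obtain ⟨he, hsh⟩ := pvCellO hd a k hk row ht hjd
          exact ⟨hsh, he⟩
        · simp only [if_true, ite_true]
          obtain ⟨he, hsh⟩ := pvCellE hd a k hk row ht hjd
          exact ⟨hsh, he⟩)
      (pvSPC d st) st ⟨hS, rfl⟩
  exact ⟨h.2, h.1⟩

theorem pvShape_zeroGrid (d : Nat) : pvShape d (pvZeroGrid d) := by
  refine ⟨by simp [pvZeroGrid], ?_⟩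
  intro p hp
  unfold pvZeroGrid
  rw [PySem.List.getD_map_range _ _ _ _ hp]
  simp

theorem pvG_zeroGrid {d : Nat} {p q : Nat} (hp : p < d) (hq : q < d) :
    pvG (pvZeroGrid d) p q = 0 := by
  unfold pvG pvZeroGrid
  rw [PySem.List.getD_map_range _ _ _ _ hp, PySem.List.getD_map_range _ _ _ _ hq]

theorem pvInit (d : Nat) :
    (pvZeros (d : Int) (d : Int), pvZeros (d : Int) (d : Int))
      = pvSPC d ((pvZeroGrid d, pvZeroGrid d), (pvZeroGrid d, pvZeroGrid d)) := by
  have hzs : pvShape d (pvZeros (d : Int) (d : Int)) := by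
    refine ⟨by simp [pvZeros, PySem.List.pyRange_zero_nat], ?_⟩
    intro p hp
    unfold pvZeros
    rw [PySem.List.pyRange_zero_nat, List.map_map, PySem.List.getD_map_range _ _ _ _ hp]
    simp [PySem.List.pyRange_zero_nat]
  have hgz : ∀ p < d, ∀ q < d, pvG (pvZeros (d : Int) (d : Int)) p q = 0 := by
    intro p hp q hq
    unfold pvG pvZeros
    rw [PySem.List.pyRange_zero_nat, List.map_map, PySem.List.getD_map_range _ _ _ _ hp]
    simp [List.getElem?_eq_getElem (by simpa using hq : q < (List.range d).length)]
  unfold pvSPC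
  refine Prod.ext ?_ ?_ <;> simp only
  · apply pvExt hzs (pvShape_stencilP d _ _)
    intro p hp q hq
    obtain ⟨hQlt, _⟩ := pvModIdx_lt (by omega : 0 < d) ((q : Int) - 1)
    obtain ⟨hPlt, _⟩ := pvModIdx_lt (by omega : 0 < d) ((p : Int) - 1)
    rw [hgz p hp q hq, pvG_stencilP _ _ hp hq, pvG_zeroGrid hp hq, pvG_zeroGrid hp hQlt,
      pvG_zeroGrid hPlt hq]
    norm_num
  · apply pvExt hzs (pvShape_stencilC d _ _)
    intro p hp q hq
    have hp1 : (p + 1) % d < d := Nat.mod_lt _ (by omega)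
    have hq1 : (q + 1) % d < d := Nat.mod_lt _ (by omega)
    rw [hgz p hp q hq, pvG_stencilC _ _ hp hq, pvG_zeroGrid hp hq, pvG_zeroGrid hp1 hq,
      pvG_zeroGrid hp hq1]
    norm_num

theorem pvA_normal (em : List (List Int)) :
    generate_syndromes em
      = (List.range em.length).foldl (fun st i =>
          (List.range (em.headD []).length).foldl
            ((if i % 2 == 0 then pvABodyE else pvABodyO) ((i / 2 : Nat) : Int) (em.getD i [])) st)
        (pvZeros ((em.headD []).length : Int) ((em.headD []).length : Int),
         pvZeros ((em.headD []).length : Int) ((em.headD []).length : Int)) := by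
  simp only [generate_syndromes, PySem.List.len_eq, PySem.List.pyRange_zero_nat,
    List.foldl_map, PySem.List.pyGetD_natCast, PySem.Int.mod_natCast, PySem.Int.floordiv_natCast]
  apply PySem.List.foldl_congr_mem
  intro st i hi
  apply PySem.List.foldl_congr_mem
  intro st' j hj
  have hmod : PySem.Int.mod ((i : Nat) : Int) 2 = ((i % 2 : Nat) : Int) := by
    exact_mod_cast PySem.Int.mod_natCast i 2
  have hdiv : PySem.Int.floordiv ((i : Nat) : Int) 2 = ((i / 2 : Nat) : Int) := by
    exact_mod_cast PySem.Int.floordiv_natCast i 2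
  rw [hmod, hdiv]
  by_cases hpar : i % 2 = 0
  · have hb : (((i % 2 : Nat) : Int) == 0) = true := by simp [hpar]
    have hb2 : (i % 2 == 0) = true := by simp [hpar]
    simp only [hb, hb2, if_true, ite_true, pvABodyE]
  · have hb : (((i % 2 : Nat) : Int) == 0) = false := by simp; omega
    have hb2 : (i % 2 == 0) = false := by simp [hpar]
    have h1 : ((i : Int) - 1) = ((i - 1 : Nat) : Int) := by omega
    have h2 : ((i : Int) + 1) = ((i + 1 : Nat) : Int) := by omega
    have hdm : PySem.Int.floordiv ((i - 1 : Nat) : Int) 2 = (((i - 1) / 2 : Nat) : Int) := by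
      exact_mod_cast PySem.Int.floordiv_natCast (i - 1) 2
    have hdp : PySem.Int.floordiv ((i + 1 : Nat) : Int) 2 = (((i + 1) / 2 : Nat) : Int) := by
      exact_mod_cast PySem.Int.floordiv_natCast (i + 1) 2
    have h3 : (i - 1) / 2 = i / 2 := by omega
    have h4 : (((i + 1) / 2 : Nat) : Int) = ((i / 2 : Nat) : Int) + 1 := by
      have h5 : (i + 1) / 2 = i / 2 + 1 := by omega
      rw [h5]; push_cast; ring
    simp only [hb, hb2, if_false, ite_false, Bool.false_eq_true, h1, h2, hdm, hdp,
      h3, h4, pvABodyO]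

-- ===== VERDICT (by name: the statement is the Claim_ definition above) =====
theorem generate_syndromes_spec : Claim_equal_generate_syndromes := by
  intro em _hDom _hPre
  unfold Spec_generate_syndromes
  by_cases hd0 : (em.headD []).length = 0
  · rw [pvA_normal em]
    simp only [hd0, List.range_zero, List.foldl_nil, Nat.cast_zero]
    rw [pvFoldlConst]
    have hz : pvZeros 0 0 = ([] : List (List Int)) := rfl
    rw [hz]
    simp only [generate_syndromes_alt]
    rw [if_pos hd0]
  · have hd : 0 < (em.headD []).length := Nat.pos_of_ne_zero hd0
    rw [pvA_normal em, pvInit (em.headD []).length]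
    have h := pvFoldSim (α := Nat)
      (R := fun s t => pvShape4 (em.headD []).length t ∧ s = pvSPC (em.headD []).length t)
      (List.range em.length)
      (fun st i => (List.range (em.headD []).length).foldl
        ((if i % 2 == 0 then pvABodyE else pvABodyO) ((i / 2 : Nat) : Int) (em.getD i [])) st)
      (fun st i => pvAccumRow (i % 2 == 0) (i / 2 % (em.headD []).length) (em.headD []).length
        (em.getD i []) st)
      (by
        intro s t i _hi ⟨ht, hs⟩
        subst hs
        obtain ⟨he, hsh⟩ := pvRow hd (i % 2 == 0) ((i / 2 : Nat) : Int) (i / 2 % (em.headD []).length)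
          (PySem.Int.mod_natCast (i / 2) (em.headD []).length).symm (em.getD i []) ht
        exact ⟨hsh, he⟩)
      (pvSPC (em.headD []).length ((pvZeroGrid (em.headD []).length, pvZeroGrid (em.headD []).length),
        (pvZeroGrid (em.headD []).length, pvZeroGrid (em.headD []).length)))
      ((pvZeroGrid (em.headD []).length, pvZeroGrid (em.headD []).length),
        (pvZeroGrid (em.headD []).length, pvZeroGrid (em.headD []).length))
      ⟨⟨pvShape_zeroGrid _, pvShape_zeroGrid _, pvShape_zeroGrid _, pvShape_zeroGrid _⟩, rfl⟩
    rw [h.2]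
    simp only [generate_syndromes_alt, if_neg hd0, pvSPC]
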